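-- pv_equiv track=rewrite | github.com/Sidharth2971996/zemoso-training | Codility_Assignment/LessthanThree.py | islovely
-- ===== SOURCE A (Python) =====
-- def islovely(n):
--     s=str(n)
--     d={}
--     for i in range(len(s)):
--         try:
--             d[s[i]]=d[s[i]]+ 1
--         except:
--             d[s[i]]=1
--     for i in d:
--         if d[i]>=3:
--             return 0
--     return 1
-- ===== SOURCE B (Python) =====
-- def islovely(n):
--     t = sorted(str(n))
--     return 0 if any(a == c for a, c in zip(t, t[2:])) else 1
-- ===== Notes on version B (the rewrite author's own statement) =====
-- stated objective: idiomatic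
-- what changed: Replaces the hand-built dict histogram plus a second key scan with sort-then-scan over the characters of str(n): after sorting, a character of multiplicity three or more appears as a pair of equal characters two positions apart, found in a single zip/any pass.
import Mathlib
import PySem

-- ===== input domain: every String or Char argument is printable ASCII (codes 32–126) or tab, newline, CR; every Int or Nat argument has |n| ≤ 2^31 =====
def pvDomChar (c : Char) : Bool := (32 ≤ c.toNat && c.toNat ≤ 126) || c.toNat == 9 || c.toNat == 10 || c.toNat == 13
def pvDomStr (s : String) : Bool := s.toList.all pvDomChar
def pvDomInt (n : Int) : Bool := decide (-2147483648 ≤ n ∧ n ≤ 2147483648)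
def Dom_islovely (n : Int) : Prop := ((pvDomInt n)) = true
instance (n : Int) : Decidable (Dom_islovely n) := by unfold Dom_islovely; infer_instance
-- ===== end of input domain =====

-- B replaces A's hand-built dict histogram + second key scan by an idiomatic sort-then-scan
-- (after sorting str(n), a digit occurring 3+ times is exactly a pair t[i] == t[i+2]).

-- ===== PORT A =====
def islovely (n : Int) : Int :=
  let s := PySem.Int.toChars n
  let d := s.foldl (fun d c =>
    match d.get? c with          -- try: d[c] = d[c] + 1  /  except: d[c] = 1
    | some v => d.insert c (v + 1)
    | none   => d.insert c 1) (PySem.Dict.empty : PySem.Dict Char Int)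
  if d.items.any (fun p => 3 ≤ p.2) then 0 else 1   -- for i in d: if d[i] >= 3: return 0 / return 1

-- ===== PORT B =====
def islovely_alt (n : Int) : Int :=
  let t := PySem.List.sorted (PySem.Int.toChars n) (fun c => c) false
  if (t.zip (t.drop 2)).any (fun p => p.1 == p.2) then 0 else 1

-- ===== PRECONDITION & SPEC =====
def Spec_islovely (n : Int) (out : Int) : Prop := out = islovely_alt n
instance (n : Int) (out : Int) : Decidable (Spec_islovely n out) := by unfold Spec_islovely; infer_instance

-- ===== CLAIM (what is proved, stated in full; the proofs are below) =====
def Claim_equal_islovely : Prop := ∀ (n : Int), Dom_islovely n → Spec_islovely n (islovely n)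

-- ===== LEMMAS AND PROOFS =====

-- A's try/except counting step is exactly the Counter step.
theorem foldl_try_eq_counter (s : List Char) :
    s.foldl (fun d c =>
      match d.get? c with
      | some v => d.insert c (v + 1)
      | none   => d.insert c 1) (PySem.Dict.empty : PySem.Dict Char Int) = PySem.Dict.counter s := by
  rw [← PySem.Dict.foldl_insert_getD_add_one_eq_counter]
  congr 1
  funext d c
  simp [PySem.Dict.getD]
  cases d.get? c <;> simp

-- B's scan on the sorted list detects exactly a character of multiplicity ≥ 3.
theorem any3_iff (t : List Char) (h : t.Pairwise (· ≤ ·)) :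
    ((t.zip (t.drop 2)).any (fun p => p.1 == p.2) = true ↔ ∃ x, 3 ≤ t.count x) := by
  match t with
  | [] => simp
  | [a] =>
    simp only [List.drop, List.zip_nil_right, List.any_nil, Bool.false_eq_true, false_iff]
    rintro ⟨x, hx⟩
    have h1 : List.count x [a] ≤ 1 := by
      simpa using List.count_le_length (l := [a]) (a := x)
    omega
  | [a, b] =>
    simp only [List.drop, List.zip_nil_right, List.any_nil, Bool.false_eq_true, false_iff]
    rintro ⟨x, hx⟩
    have h1 : List.count x [a, b] ≤ 2 := by
      simpa using List.count_le_length (l := [a, b]) (a := x)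
    omega
  | a :: b :: c :: r =>
    rw [List.pairwise_cons] at h
    obtain ⟨hhead, htail⟩ := h
    have hab : a ≤ b := hhead b (by simp)
    have hac : a ≤ c := hhead c (by simp)
    rw [List.pairwise_cons] at htail
    obtain ⟨hbhead, htail2⟩ := htail
    have hbc : b ≤ c := hbhead c (by simp)
    have hcr : ∀ y ∈ r, c ≤ y := by
      rw [List.pairwise_cons] at htail2
      exact htail2.1
    have ih := any3_iff (b :: c :: r) (by
      rw [List.pairwise_cons]; exact ⟨hbhead, htail2⟩)
    constructor
    · intro hany
      simp only [List.drop_succ_cons, List.drop_zero, List.zip_cons_cons, List.any_cons,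
        Bool.or_eq_true] at hany
      rcases hany with hone | hrest
      · simp only [beq_iff_eq] at hone
        have hba : b = a := le_antisymm (hone ▸ hbc) hab
        refine ⟨a, ?_⟩
        simp [hone, hba]
      · rcases ih.mp (by simpa using hrest) with ⟨x, hx⟩
        refine ⟨x, ?_⟩
        have : (b :: c :: r).count x ≤ (a :: b :: c :: r).count x :=
          (List.sublist_cons_self a _).count_le x
        omega
    · rintro ⟨x, hx⟩
      simp only [List.drop_succ_cons, List.drop_zero, List.zip_cons_cons, List.any_cons,
        Bool.or_eq_true]
      by_cases hxa : x = a
      · by_cases hc : a = c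
        · left; simp [hc]
        · exfalso
          have hxlt : a < c := lt_of_le_of_ne hac hc
          have hcr0 : List.count a (c :: r) = 0 := by
            rw [List.count_eq_zero]
            intro hmem
            rcases List.mem_cons.mp hmem with h1 | h1
            · exact absurd h1 (ne_of_lt hxlt)
            · exact absurd rfl (ne_of_gt (lt_of_lt_of_le hxlt (hcr a h1)))
          have hsplit : (a :: b :: c :: r) = [a, b] ++ (c :: r) := rfl
          have hab2 : List.count a [a, b] ≤ 2 := by
            simpa using List.count_le_length (l := [a, b]) (a := a)
          have hfull : List.count a (a :: b :: c :: r) ≤ 2 := by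
            rw [hsplit, List.count_append, hcr0]
            omega
          rw [hxa] at hx
          omega
      · right
        have hxv : (b :: c :: r).count x = (a :: b :: c :: r).count x := by
          simp [List.count_cons, Ne.symm hxa]
        simpa using ih.mpr ⟨x, by omega⟩
termination_by t.length

theorem islovely_spec : Claim_equal_islovely := by
  intro n _
  unfold Spec_islovely islovely islovely_alt
  simp only [foldl_try_eq_counter, PySem.Dict.items_counter]
  set s := PySem.Int.toChars n with hs
  set t := PySem.List.sorted s (fun c => c) false with ht
  have hperm : t.Perm s := PySem.List.sorted_perm s (fun c => c) false
  have hpw : t.Pairwise (· ≤ ·) := by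
    have := PySem.List.sorted_pairwise (xs := s) (key := fun c => c)
    simpa using this
  have hA : ((PySem.Set.ofList s).map (fun k => (k, (s.count k : Int)))).any (fun p => 3 ≤ p.2) = true
      ↔ ∃ x, 3 ≤ s.count x := by
    simp only [List.any_map, List.any_eq_true, Function.comp, decide_eq_true_eq]
    constructor
    · rintro ⟨k, _, hk⟩
      exact ⟨k, by exact_mod_cast hk⟩
    · rintro ⟨k, hk⟩
      refine ⟨k, ?_, by exact_mod_cast hk⟩
      have : k ∈ s := List.count_pos_iff.mp (by omega)
      simpa [PySem.Set.mem_ofList] using this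
  have hB := any3_iff t hpw
  have hcount : ∀ x, t.count x = s.count x := fun x => hperm.count_eq x
  simp only [hcount] at hB
  by_cases hex : ∃ x, 3 ≤ s.count x
  · rw [if_pos (hA.mpr hex), if_pos (hB.mpr hex)]
  · rw [if_neg (fun hh => hex (hA.mp hh)), if_neg (fun hh => hex (hB.mp hh))]
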